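-- pv_equiv track=rewrite | github.com/rjmurillo/ai-agents | scripts/sync_adr_protocol.py | parse_adr_status
-- ===== SOURCE A (Python) =====
-- def parse_adr_status(content: str) -> str:
--     """Extract status from ADR markdown content."""
--     in_status = False
--     for line in content.splitlines():
--         if line.strip() == "## Status":
--             in_status = True
--             continue
--         if in_status and line.strip():
--             return line.strip()
--         if in_status and line.startswith("## ") and line.strip() != "## Status":
--             break
--     return "Unknown"
-- ===== SOURCE B (Python) =====
-- def parse_adr_status(content: str) -> str:
--     # Backwards single pass (right fold) with two accumulators:
--     # nxt  = first non-empty, non-header stripped line of the suffix already seen,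
--     # ans  = answer assuming the '## Status' header has not yet been found.
--     ans = "Unknown"
--     nxt = "Unknown"
--     for line in reversed(content.splitlines()):
--         s = line.strip()
--         if s == "## Status":
--             ans = nxt
--         elif s:
--             nxt = s
--     return ans
-- ===== Notes on version B (the rewrite author's own statement) =====
-- stated objective: alternative
-- what changed: Replaced the forward flag-driven scan with early return (and a dead heading-break branch) by one backwards pass (a right fold) over the lines carrying two accumulators: the first relevant stripped line of each suffix, and the answer so far; the answer is read off after the fold with no flag and no early exit.
import Mathlib
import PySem

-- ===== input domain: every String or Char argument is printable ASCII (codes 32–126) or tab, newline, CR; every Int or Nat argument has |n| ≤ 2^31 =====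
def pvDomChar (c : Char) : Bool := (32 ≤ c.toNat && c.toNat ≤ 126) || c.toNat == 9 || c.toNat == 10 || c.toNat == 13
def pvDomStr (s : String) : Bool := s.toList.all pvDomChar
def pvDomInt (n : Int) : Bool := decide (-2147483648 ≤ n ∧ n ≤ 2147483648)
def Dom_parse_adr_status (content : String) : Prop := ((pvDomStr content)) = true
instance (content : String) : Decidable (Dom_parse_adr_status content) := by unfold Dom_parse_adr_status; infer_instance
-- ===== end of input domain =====

-- B replaces A's forward flag-scan (early return, dead break branch) by one backwards
-- pass (right fold) with two accumulators; same result, different traversal (objective: alternative).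


-- ===== PORT A =====
-- A's loop: one forward pass over the lines carrying the in_status flag; the three ifs in order.
def parseALoop : List String → Bool → String
  | [], _ => "Unknown"
  | l :: rest, inStatus =>
    if PySem.Str.strip l = "## Status" then parseALoop rest true
    else if inStatus = true ∧ PySem.Str.strip l ≠ "" then PySem.Str.strip l
    else if inStatus = true ∧ PySem.Str.startswith l "## " = true ∧ PySem.Str.strip l ≠ "## Status" then "Unknown"  -- break
    else parseALoop rest inStatus

def parse_adr_status (content : String) : String :=
  parseALoop (PySem.Str.splitlines content) false

-- ===== PORT B =====
-- B's loop body: state is (ans, nxt); on the header line ans becomes nxt, on a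
-- non-empty line nxt becomes its strip, otherwise the state is unchanged.
def parseBStep (fg : String × String) (l : String) : String × String :=
  let s := PySem.Str.strip l
  if s = "## Status" then (fg.2, fg.2)
  else if s ≠ "" then (fg.1, s)
  else fg

def parse_adr_status_alt (content : String) : String :=
  (List.foldl parseBStep ("Unknown", "Unknown") (PySem.Str.splitlines content).reverse).1

-- ===== PRECONDITION & SPEC =====
def Spec_parse_adr_status (content : String) (out : String) : Prop := out = parse_adr_status_alt content
instance (content : String) (out : String) : Decidable (Spec_parse_adr_status content out) := by unfold Spec_parse_adr_status; infer_instance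

-- ===== CLAIM (what is proved, stated in full; the proofs are below) =====
def Claim_equal_parse_adr_status : Prop := ∀ (content : String), Dom_parse_adr_status content → Spec_parse_adr_status content (parse_adr_status content)

-- ===== LEMMAS AND PROOFS =====

-- A line starting with "## " contains '#', so its strip is nonempty (A's break branch is unreachable).
theorem strip_ne_of_startswith (l : String) (h : PySem.Str.startswith l "## " = true) :
    PySem.Str.strip l ≠ "" := by
  intro heq
  have hpre : ("## ".toList) <+: l.toList := (PySem.Chars.startswith_iff _ _).mp (by simpa using h)
  have hmem : '#' ∈ l.toList := hpre.subset (by decide)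
  have ht := congrArg String.toList heq
  simp [PySem.Chars.strip, PySem.Chars.rstrip, PySem.Chars.lstrip] at ht
  have hmemd : '#' ∈ List.dropWhile PySem.Chars.isspace l.toList := by
    rcases List.mem_append.mp (by
      rw [List.takeWhile_append_dropWhile]; exact hmem :
        '#' ∈ List.takeWhile PySem.Chars.isspace l.toList ++ List.dropWhile PySem.Chars.isspace l.toList) with hk | hk
    · exact absurd (List.mem_takeWhile_imp hk) (by decide)
    · exact hk
  have := ht '#' hmemd
  exact absurd this (by decide)

-- The right fold computes the pair (answer with header not yet found, answer with header found).
theorem foldr_step_eq_aLoop (ls : List String) :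
    List.foldr (fun l fg => parseBStep fg l) ("Unknown", "Unknown") ls
      = (parseALoop ls false, parseALoop ls true) := by
  induction ls with
  | nil => rfl
  | cons l rest ih =>
    rw [List.foldr_cons, ih]
    by_cases h1 : PySem.Str.strip l = "## Status"
    · simp [parseALoop, parseBStep, h1]
    · by_cases h2 : PySem.Str.strip l = ""
      · have h3 : PySem.Chars.startswith l.toList ['#', '#', ' '] ≠ true := fun hs =>
          strip_ne_of_startswith l (by simpa using hs) h2
        simp [parseALoop, parseBStep, h1, h2, h3]
      · simp [parseALoop, parseBStep, h1, h2]

-- ===== VERDICT (by name: the statement is the Claim_ definition above) =====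
theorem parse_adr_status_spec : Claim_equal_parse_adr_status := by
  intro content _
  unfold Spec_parse_adr_status parse_adr_status parse_adr_status_alt
  rw [List.foldl_reverse, foldr_step_eq_aLoop]
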